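-- pv_equiv track=rewrite | github.com/aldonadi/cs340_projecttwo | shelter_sight.py | get_quick_filter_button_classnames
-- ===== SOURCE A (Python) =====
-- def get_quick_filter_button_classnames(clicked_button_id, total_buttons):
--     """
--     Based on the given clicked button id string and the total number of buttons,
--     returns a list of CSS class names, one per button, such that only the selected
--     button gets the extra 'selected' class for styling.
--     """
--     class_names = []
--     for i in range(1, total_buttons + 1):
--         button_id = f"quick-filter-button-{i}"
--         if button_id == clicked_button_id:
--             class_names.append("quick-filter selected")
--         else:
--             class_names.append("quick-filter")
--
--     return class_names
-- ===== SOURCE B (Python) =====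
-- def get_quick_filter_button_classnames(clicked_button_id, total_buttons):
--     """Direct decode of the clicked id instead of scanning all candidate ids."""
--     result = ["quick-filter"] * total_buttons
--     prefix = "quick-filter-button-"
--     if clicked_button_id.startswith(prefix):
--         suffix = clicked_button_id[len(prefix):]
--         if suffix.isdigit() and not suffix.startswith("0"):
--             n = 0
--             for ch in suffix:
--                 n = 10 * n + (ord(ch) - 48)
--             if n <= total_buttons:
--                 result[n - 1] = "quick-filter selected"
--     return result
-- ===== Notes on version B (the rewrite author's own statement) =====
-- stated objective: faster
-- what changed: Instead of generating every candidate id 'quick-filter-button-i' for i in 1..total_buttons and string-comparing each against the clicked id, B builds the default class list in one shot and decodes the clicked id directly: strip the literal prefix, check the suffix is a canonical decimal (digits, no leading zero), fold it to the number n, and overwrite slot n-1 when 1 <= n <= total_buttons.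
import Mathlib
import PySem

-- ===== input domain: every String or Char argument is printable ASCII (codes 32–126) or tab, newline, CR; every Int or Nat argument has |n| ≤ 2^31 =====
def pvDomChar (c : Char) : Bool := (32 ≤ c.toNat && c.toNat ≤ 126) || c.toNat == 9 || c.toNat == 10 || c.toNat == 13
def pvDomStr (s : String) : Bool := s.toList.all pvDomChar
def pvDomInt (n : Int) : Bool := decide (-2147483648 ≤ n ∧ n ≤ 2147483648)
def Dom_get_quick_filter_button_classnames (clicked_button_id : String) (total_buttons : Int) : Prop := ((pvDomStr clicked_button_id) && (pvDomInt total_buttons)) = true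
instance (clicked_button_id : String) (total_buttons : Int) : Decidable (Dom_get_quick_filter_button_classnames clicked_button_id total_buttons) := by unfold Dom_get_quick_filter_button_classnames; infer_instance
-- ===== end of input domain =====

-- B builds the flat default list once and decodes the clicked id's numeric suffix directly,
-- instead of generating and comparing all total_buttons candidate ids (objective: faster).

-- ===== PORT A =====
def get_quick_filter_button_classnames (clicked_button_id : String) (total_buttons : Int) : List String :=
  (PySem.List.pyRange 1 (total_buttons + 1)).foldl
    (fun class_names i =>
      let button_id : String := "quick-filter-button-" ++ PySem.Int.toStr i
      if button_id == clicked_button_id then class_names ++ ["quick-filter selected"]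
      else class_names ++ ["quick-filter"])
    []

-- ===== PORT B =====
def get_quick_filter_button_classnames_alt (clicked_button_id : String) (total_buttons : Int) : List String :=
  let result := PySem.List.pyRepeat ["quick-filter"] total_buttons
  if PySem.Str.startswith clicked_button_id "quick-filter-button-" then
    let suffix := PySem.Str.slice clicked_button_id (some (PySem.Str.len "quick-filter-button-")) none
    if PySem.Str.strIsdigit suffix && !(PySem.Str.startswith suffix "0") then
      let n : Int := suffix.toList.foldl (fun n ch => 10 * n + ((ch.toNat : Int) - 48)) 0
      if n ≤ total_buttons then
        PySem.List.pySetD result (n - 1) "quick-filter selected"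
      else result
    else result
  else result

-- ===== PRECONDITION & SPEC =====
def Spec_get_quick_filter_button_classnames (clicked_button_id : String) (total_buttons : Int) (out : List String) : Prop := out = get_quick_filter_button_classnames_alt clicked_button_id total_buttons
instance (clicked_button_id : String) (total_buttons : Int) (out : List String) : Decidable (Spec_get_quick_filter_button_classnames clicked_button_id total_buttons out) := by unfold Spec_get_quick_filter_button_classnames; infer_instance

-- ===== CLAIM (what is proved, stated in full; the proofs are below) =====
def Claim_equal_get_quick_filter_button_classnames : Prop := ∀ (clicked_button_id : String) (total_buttons : Int), Dom_get_quick_filter_button_classnames clicked_button_id total_buttons → Spec_get_quick_filter_button_classnames clicked_button_id total_buttons (get_quick_filter_button_classnames clicked_button_id total_buttons)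

-- ===== LEMMAS AND PROOFS =====

-- decimal value of a digit string, as B's fold computes it
def pvDec (cs : List Char) : Int := cs.foldl (fun n ch => 10 * n + ((ch.toNat : Int) - 48)) 0
-- canonical decimal representation of a natural number (big-endian digit chars)
def pvRep (m : Nat) : List Char := ((Nat.digits 10 m).map Nat.digitChar).reverse

lemma pv_isdigit_bounds (c : Char) (h : PySem.Chars.isdigit c = true) :
    48 ≤ c.toNat ∧ c.toNat ≤ 57 := by
  simp only [PySem.Chars.isdigit, Bool.and_eq_true, decide_eq_true_eq] at h
  obtain ⟨h1, h2⟩ := h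
  rw [Char.le_def] at h1 h2
  rw [UInt32.le_iff_toNat_le] at h1 h2
  exact ⟨h1, h2⟩

lemma pv_digitChar_toNat (d : Nat) (h : d < 10) : (Nat.digitChar d).toNat = d + 48 := by
  interval_cases d <;> rfl

lemma pv_isdigit_digitChar (d : Nat) (h : d < 10) :
    PySem.Chars.isdigit (Nat.digitChar d) = true := by
  interval_cases d <;> rfl

lemma pv_digitChar_eq_zero (d : Nat) (h : d < 10) : Nat.digitChar d = '0' ↔ d = 0 := by
  interval_cases d <;> simp <;> decide

lemma pv_digitChar_roundtrip (c : Char) (h : PySem.Chars.isdigit c = true) :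
    Nat.digitChar (c.toNat - 48) = c := by
  obtain ⟨h1, h2⟩ := pv_isdigit_bounds c h
  have : Char.ofNat (c.toNat - 48 + 48) = Nat.digitChar (c.toNat - 48) := by
    have hd : c.toNat - 48 < 10 := by omega
    interval_cases h : (c.toNat - 48) <;> simp_all <;> rfl
  rw [← this, show c.toNat - 48 + 48 = c.toNat by omega, Char.ofNat_toNat]

lemma pv_pvDec_append (cs : List Char) (c : Char) :
    pvDec (cs ++ [c]) = 10 * pvDec cs + ((c.toNat : Int) - 48) := by
  simp [pvDec, List.foldl_append]

lemma pv_pvDec_rep (L : List Nat) (h : ∀ d ∈ L, d < 10) :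
    pvDec ((L.map Nat.digitChar).reverse) = ((Nat.ofDigits 10 L : ℕ) : Int) := by
  induction L with
  | nil => simp [pvDec, Nat.ofDigits_nil]
  | cons d L ih =>
    simp only [List.map_cons, List.reverse_cons]
    rw [pv_pvDec_append, ih (fun x hx => h x (List.mem_cons_of_mem _ hx)),
        pv_digitChar_toNat d (h d List.mem_cons_self)]
    have hc : ((Nat.ofDigits 10 (d :: L) : ℕ) : Int)
        = (d : Int) + 10 * ((Nat.ofDigits 10 L : ℕ) : Int) := by
      rw [Nat.ofDigits_cons]
      push_cast
      ring
    rw [hc]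
    push_cast
    ring

lemma pv_toDigitsCore_eq : ∀ (n fuel : Nat) (ds : List Char), n < fuel →
    Nat.toDigitsCore 10 fuel n ds = (if n = 0 then ['0'] else pvRep n) ++ ds := by
  intro n
  induction n using Nat.strong_induction_on with
  | _ n ih =>
    intro fuel ds hf
    obtain ⟨f, rfl⟩ : ∃ f, fuel = f + 1 := ⟨fuel - 1, by omega⟩
    rw [Nat.toDigitsCore]
    by_cases h0 : n / 10 = 0
    · have h10 : n < 10 := by
        rcases Nat.div_eq_zero_iff.mp h0 with h | h
        · omega
        · exact h
      rw [if_pos h0]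
      by_cases hn : n = 0
      · subst hn
        rw [if_pos rfl]
        rfl
      · have hdig : Nat.digits 10 n = [n] := by
          rw [Nat.digits_def' (by norm_num : (1:ℕ) < 10) (Nat.pos_of_ne_zero hn),
              Nat.mod_eq_of_lt h10, h0]
          simp
        rw [if_neg hn]
        simp [pvRep, hdig, Nat.mod_eq_of_lt h10]
    · have hnpos : 0 < n := by
        by_contra hc
        exact h0 (by simp [show n = 0 by omega])
      have hdivlt : n / 10 < n := Nat.div_lt_self hnpos (by norm_num)
      have hcall : n / 10 < f := by omega
      rw [if_neg h0, ih (n / 10) hdivlt f _ hcall, if_neg h0]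
      have hdig : Nat.digits 10 n = n % 10 :: Nat.digits 10 (n / 10) :=
        Nat.digits_def' (by norm_num : (1:ℕ) < 10) hnpos
      have hrep : pvRep n = pvRep (n / 10) ++ [Nat.digitChar (n % 10)] := by
        simp only [pvRep, hdig, List.map_cons, List.reverse_cons]
      rw [if_neg (by omega : ¬ n = 0), hrep, List.append_assoc, List.singleton_append]

lemma pv_toChars_eq (i : Int) (h : 1 ≤ i) : PySem.Int.toChars i = pvRep i.toNat := by
  have hneg : ¬ i < 0 := by omega
  simp only [PySem.Int.toChars, if_neg hneg]
  rw [Nat.toDigits, pv_toDigitsCore_eq i.toNat (i.toNat + 1) [] (by omega),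
      if_neg (by omega : ¬ i.toNat = 0)]
  simp

lemma pv_rep_ne_nil (m : Nat) (hm : 1 ≤ m) : pvRep m ≠ [] := by
  have hne : Nat.digits 10 m ≠ [] := Nat.digits_ne_nil_iff_ne_zero.mpr (by omega)
  simp [pvRep, hne]

lemma pv_rep_head (m : Nat) (hm : 1 ≤ m) :
    (pvRep m).head? = some (Nat.digitChar ((Nat.digits 10 m).getLast
      (Nat.digits_ne_nil_iff_ne_zero.mpr (by omega)))) := by
  have hne : Nat.digits 10 m ≠ [] := Nat.digits_ne_nil_iff_ne_zero.mpr (by omega)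
  rw [pvRep, List.head?_reverse, List.getLast?_map, List.getLast?_eq_some_getLast hne]
  rfl

lemma pv_startswith_zero_iff (cs : List Char) :
    PySem.Chars.startswith cs ['0'] = true ↔ cs.head? = some '0' := by
  cases cs with
  | nil => simp [PySem.Chars.startswith, List.isPrefixOf]
  | cons c rest =>
    simp [PySem.Chars.startswith, List.isPrefixOf]
    try exact eq_comm

lemma pv_rep_canon (m : Nat) (hm : 1 ≤ m) :
    PySem.Chars.strIsdigit (pvRep m) = true ∧
    PySem.Chars.startswith (pvRep m) ['0'] = false ∧
    pvDec (pvRep m) = (m : Int) := by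
  have hne : Nat.digits 10 m ≠ [] := Nat.digits_ne_nil_iff_ne_zero.mpr (by omega)
  refine ⟨?_, ?_, ?_⟩
  · rw [PySem.Chars.strIsdigit]
    have h1 : (pvRep m).isEmpty = false := by
      rw [Bool.eq_false_iff]
      intro h
      exact pv_rep_ne_nil m hm (List.isEmpty_iff.mp h)
    have h2 : (pvRep m).all PySem.Chars.isdigit = true := by
      rw [List.all_eq_true]
      intro c hc
      rw [pvRep, List.mem_reverse, List.mem_map] at hc
      obtain ⟨d, hd, rfl⟩ := hc
      exact pv_isdigit_digitChar d (Nat.digits_lt_base (by norm_num) hd)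
    rw [h1, h2]
    rfl
  · rw [Bool.eq_false_iff]
    intro hsw
    rw [pv_startswith_zero_iff, pv_rep_head m hm] at hsw
    have hlast := Nat.getLast_digit_ne_zero 10 (show m ≠ 0 by omega)
    have hmem : (Nat.digits 10 m).getLast hne ∈ Nat.digits 10 m := List.getLast_mem hne
    have hlt : (Nat.digits 10 m).getLast hne < 10 := Nat.digits_lt_base (by norm_num) hmem
    have := (pv_digitChar_eq_zero _ hlt).mp (by simpa using hsw)
    exact hlast this
  · rw [pvRep, pv_pvDec_rep (Nat.digits 10 m) (fun d hd => Nat.digits_lt_base (by norm_num) hd),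
        Nat.ofDigits_digits]

lemma pv_canon_rep (cs : List Char)
    (h1 : PySem.Chars.strIsdigit cs = true)
    (h2 : PySem.Chars.startswith cs ['0'] = false) :
    1 ≤ pvDec cs ∧ pvRep (pvDec cs).toNat = cs := by
  rw [PySem.Chars.strIsdigit, Bool.and_eq_true] at h1
  obtain ⟨hne', hall⟩ := h1
  have hne : cs ≠ [] := by
    intro h
    rw [h] at hne'
    simp at hne'
  have hdig : ∀ c ∈ cs, PySem.Chars.isdigit c = true := by
    rw [List.all_eq_true] at hall
    exact hall
  set L : List Nat := (cs.map (fun c => c.toNat - 48)).reverse with hL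
  have hmap : (L.map Nat.digitChar).reverse = cs := by
    rw [hL, List.map_reverse, List.reverse_reverse, List.map_map]
    conv_rhs => rw [← List.map_id cs]
    apply List.map_congr_left
    intro c hc
    exact pv_digitChar_roundtrip c (hdig c hc)
  have hlt : ∀ d ∈ L, d < 10 := by
    intro d hd
    rw [hL, List.mem_reverse, List.mem_map] at hd
    obtain ⟨c, hc, rfl⟩ := hd
    have := pv_isdigit_bounds c (hdig c hc)
    omega
  have hL0 : L ≠ [] := by
    rw [hL]
    simp [hne]
  have hlast : ∀ (h : L ≠ []), L.getLast h ≠ 0 := by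
    intro h
    obtain ⟨c0, rest, hcs⟩ := List.exists_cons_of_ne_nil hne
    have hc0 : c0 ≠ '0' := by
      intro hc
      rw [Bool.eq_false_iff] at h2
      exact h2 (pv_startswith_zero_iff _ |>.mpr (by rw [hcs, hc]; rfl))
    have hb := pv_isdigit_bounds c0 (hdig c0 (by rw [hcs]; exact List.mem_cons_self))
    have hc48 : c0.toNat ≠ 48 := by
      intro hn
      apply hc0
      rw [← Char.ofNat_toNat c0, hn]
      try rfl
    have hgl1 : L.getLast? = some (L.getLast h) := List.getLast?_eq_some_getLast h
    have hgl2 : L.getLast? = some (c0.toNat - 48) := by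
      rw [hL, List.getLast?_reverse, hcs]
      try rfl
      try simp
    rw [hgl1] at hgl2
    have := Option.some.inj hgl2
    omega
  have hofd : Nat.digits 10 (Nat.ofDigits 10 L) = L :=
    Nat.digits_ofDigits 10 (by norm_num) L hlt hlast
  have hdec : pvDec cs = ((Nat.ofDigits 10 L : ℕ) : Int) := by
    rw [← hmap, pv_pvDec_rep L hlt]
  have hpos : (Nat.ofDigits 10 L : ℕ) ≠ 0 := by
    intro h
    apply hL0
    rw [← hofd, h]
    simp
  constructor
  · rw [hdec]
    exact_mod_cast Nat.one_le_iff_ne_zero.mpr hpos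
  · rw [hdec, Int.toNat_natCast, pvRep, hofd, hmap]

lemma pv_A_foldl (c : String) (l : List Int) (acc : List String) :
    l.foldl (fun class_names i =>
      let button_id : String := "quick-filter-button-" ++ PySem.Int.toStr i
      if button_id == c then class_names ++ ["quick-filter selected"]
      else class_names ++ ["quick-filter"]) acc
    = acc ++ l.map (fun i =>
        if ("quick-filter-button-" ++ PySem.Int.toStr i) == c then "quick-filter selected"
        else "quick-filter") := by
  induction l generalizing acc with
  | nil => simp
  | cons i l ih =>
    simp only [List.foldl_cons, List.map_cons]
    rw [ih]
    split <;> simp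

lemma pv_prefix_len : ("quick-filter-button-".toList).length = 20 := by decide

lemma pv_match_iff (c : String) (i : Int) :
    (("quick-filter-button-" ++ PySem.Int.toStr i) == c) = true ↔
    (PySem.Str.startswith c "quick-filter-button-" = true ∧
      c.toList.drop 20 = PySem.Int.toChars i) := by
  rw [beq_iff_eq]
  constructor
  · rintro rfl
    constructor
    · rw [PySem.Str.startswith, PySem.Chars.startswith, String.toList_append]
      rw [List.isPrefixOf_iff_prefix]
      exact List.prefix_append _ _
    · rw [String.toList_append, PySem.Int.toList_toStr, ← pv_prefix_len, List.drop_left]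
  · rintro ⟨hp, hd⟩
    rw [PySem.Str.startswith, PySem.Chars.startswith, List.isPrefixOf_iff_prefix] at hp
    obtain ⟨t, ht⟩ := hp
    apply String.ext
    rw [String.toList_append, PySem.Int.toList_toStr, ← hd, ← ht, ← pv_prefix_len,
        List.drop_left]

lemma pv_map_plain (m : Nat) (f : Nat → String) (h : ∀ k < m, f k = "quick-filter") :
    (List.range m).map f = List.replicate m "quick-filter" := by
  rw [List.eq_replicate_iff]
  constructor
  · simp
  · intro b hb
    rw [List.mem_map] at hb
    obtain ⟨k, hk, rfl⟩ := hb
    exact h k (List.mem_range.mp hk)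

lemma pv_map_set (m : Nat) (n : Int) (h1 : 1 ≤ n) (_h2 : n ≤ (m : Int)) :
    (List.range m).map (fun k : Nat =>
        if ((1 : Int) + (k : Int)) = n then "quick-filter selected" else "quick-filter")
      = (List.replicate m "quick-filter").set (n - 1).toNat "quick-filter selected" := by
  apply List.ext_getElem
  · simp
  · intro k hk1 hk2
    rw [List.getElem_map, List.getElem_range, List.getElem_set]
    rw [List.length_map, List.length_range] at hk1
    by_cases hk : (1 : Int) + (k : Int) = n
    · rw [if_pos hk, if_pos (by omega)]
    · rw [if_neg hk, if_neg (by omega), List.getElem_replicate]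

lemma pv_suffix_toList (c : String) :
    (PySem.Str.slice c (some (PySem.Str.len "quick-filter-button-")) none).toList
      = c.toList.drop 20 := by
  have hlen : PySem.Str.len "quick-filter-button-" = (20 : Int) := by decide
  rw [PySem.Str.slice, String.toList_ofList, hlen, PySem.Chars.slice_eq_listSlice,
      PySem.List.slice_from c.toList (by norm_num : (0:Int) ≤ 20)]
  rfl

-- the single-button-match characterisation used in every branch
lemma pv_match_canon (c : String) (i : Int) (hi : 1 ≤ i) :
    (("quick-filter-button-" ++ PySem.Int.toStr i) == c) = true ↔
    (PySem.Str.startswith c "quick-filter-button-" = true ∧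
      PySem.Chars.strIsdigit (c.toList.drop 20) = true ∧
      PySem.Chars.startswith (c.toList.drop 20) ['0'] = false ∧
      pvDec (c.toList.drop 20) = i) := by
  rw [pv_match_iff]
  constructor
  · rintro ⟨hp, hd⟩
    rw [hd, pv_toChars_eq i hi]
    have hcanon := pv_rep_canon i.toNat (by omega)
    refine ⟨hp, hcanon.1, hcanon.2.1, ?_⟩
    rw [hcanon.2.2]
    omega
  · rintro ⟨hp, h1, h2, h3⟩
    have hcr := pv_canon_rep _ h1 h2
    refine ⟨hp, ?_⟩
    rw [pv_toChars_eq i hi, ← hcr.2, h3]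

-- ===== VERDICT (by name: the statement is the Claim_ definition above) =====
theorem get_quick_filter_button_classnames_spec : Claim_equal_get_quick_filter_button_classnames := by
  intro c t _
  unfold Spec_get_quick_filter_button_classnames
  unfold get_quick_filter_button_classnames get_quick_filter_button_classnames_alt
  rw [pv_A_foldl, List.nil_append, PySem.List.pyRange_one,
      show (t + 1 - 1) = t by ring, List.map_map, PySem.List.pyRepeat_singleton]
  dsimp only
  rw [pv_suffix_toList]
  set s : List Char := c.toList.drop 20 with hs
  by_cases hp : PySem.Str.startswith c "quick-filter-button-" = true
  · rw [if_pos hp]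
    by_cases h1 : PySem.Str.strIsdigit
        (PySem.Str.slice c (some (PySem.Str.len "quick-filter-button-")) none) = true
    · have h1' : PySem.Chars.strIsdigit s = true := by
        rw [hs, ← pv_suffix_toList c]
        exact h1
      by_cases h2 : PySem.Str.startswith
          (PySem.Str.slice c (some (PySem.Str.len "quick-filter-button-")) none) "0" = true
      · -- leading-zero suffix: no button can match
        have h2' : PySem.Chars.startswith s ['0'] = true := by
          rw [hs, ← pv_suffix_toList c]
          exact h2
        have hcond : (PySem.Str.strIsdigit
              (PySem.Str.slice c (some (PySem.Str.len "quick-filter-button-")) none)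
            && !PySem.Str.startswith
              (PySem.Str.slice c (some (PySem.Str.len "quick-filter-button-")) none) "0") = false := by
          rw [h1, h2]
          rfl
        rw [hcond, if_neg (by simp : ¬ false = true)]
        apply pv_map_plain
        intro k hk
        simp only [Function.comp_apply]
        rw [if_neg]
        intro hmatch
        have hm := (pv_match_canon c (1 + (k : Int)) (by omega)).mp hmatch
        rw [← hs] at hm
        rw [hm.2.2.1] at h2'
        simp at h2'
      · -- canonical numeric suffix
        have h2f : PySem.Str.startswith
            (PySem.Str.slice c (some (PySem.Str.len "quick-filter-button-")) none) "0" = false :=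
          Bool.eq_false_iff.mpr h2
        have h2' : PySem.Chars.startswith s ['0'] = false := by
          rw [hs, ← pv_suffix_toList c]
          exact h2f
        have hcond : (PySem.Str.strIsdigit
              (PySem.Str.slice c (some (PySem.Str.len "quick-filter-button-")) none)
            && !PySem.Str.startswith
              (PySem.Str.slice c (some (PySem.Str.len "quick-filter-button-")) none) "0") = true := by
          rw [h1, h2f]
          rfl
        rw [hcond, if_pos rfl]
        have hfold : List.foldl (fun n ch => 10 * n + ((ch.toNat : Int) - 48)) 0 s = pvDec s := rfl
        rw [hfold]
        have hcr := pv_canon_rep s h1' h2'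
        by_cases hn : pvDec s ≤ t
        · rw [if_pos hn,
              PySem.List.pySetD_of_nonneg (List.replicate t.toNat "quick-filter")
                "quick-filter selected" (by omega : (0:Int) ≤ pvDec s - 1)]
          trans (List.range t.toNat).map (fun k : Nat =>
            if ((1 : Int) + (k : Int)) = pvDec s then "quick-filter selected" else "quick-filter")
          · apply List.map_congr_left
            intro k hk
            simp only [Function.comp_apply]
            by_cases hk2 : (1 : Int) + (k : Int) = pvDec s
            · have hcnd : (("quick-filter-button-" ++ PySem.Int.toStr (1 + (k : Int))) == c) = true := by
                rw [pv_match_canon c (1 + (k : Int)) (by omega)]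
                refine ⟨hp, ?_, ?_, ?_⟩ <;> rw [← hs]
                exacts [h1', h2', hk2.symm]
              rw [if_pos hcnd, if_pos hk2]
            · have hcndn : ¬ (("quick-filter-button-" ++ PySem.Int.toStr (1 + (k : Int))) == c) = true := by
                intro hmatch
                have hm := (pv_match_canon c (1 + (k : Int)) (by omega)).mp hmatch
                rw [← hs] at hm
                exact hk2 hm.2.2.2.symm
              rw [if_neg hcndn, if_neg hk2]
          · exact pv_map_set t.toNat (pvDec s) hcr.1 (by omega)
        · rw [if_neg hn]
          apply pv_map_plain
          intro k hk
          simp only [Function.comp_apply]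
          rw [if_neg]
          intro hmatch
          have hm := (pv_match_canon c (1 + (k : Int)) (by omega)).mp hmatch
          rw [← hs] at hm
          have := hm.2.2.2
          omega
    · -- suffix is not a pure digit string: no button can match
      have h1f : PySem.Str.strIsdigit
          (PySem.Str.slice c (some (PySem.Str.len "quick-filter-button-")) none) = false :=
        Bool.eq_false_iff.mpr h1
      have h1' : PySem.Chars.strIsdigit s = false := by
        rw [hs, ← pv_suffix_toList c]
        exact h1f
      have hcond : (PySem.Str.strIsdigit
            (PySem.Str.slice c (some (PySem.Str.len "quick-filter-button-")) none)
          && !PySem.Str.startswith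
            (PySem.Str.slice c (some (PySem.Str.len "quick-filter-button-")) none) "0") = false := by
        rw [h1f]
        rfl
      rw [hcond, if_neg (by simp : ¬ false = true)]
      apply pv_map_plain
      intro k hk
      simp only [Function.comp_apply]
      rw [if_neg]
      intro hmatch
      have hm := (pv_match_canon c (1 + (k : Int)) (by omega)).mp hmatch
      rw [← hs] at hm
      rw [hm.2.1] at h1'
      simp at h1'
  · -- clicked id lacks the prefix: no button can match
    rw [if_neg hp]
    apply pv_map_plain
    intro k hk
    simp only [Function.comp_apply]
    rw [if_neg]
    intro hmatch
    exact hp ((pv_match_iff c (1 + (k : Int))).mp hmatch).1
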